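-- pv_equiv track=rewrite | github.com/wwwwwwari/Arcticons-New-Icons | files/random_requests.py | line_counter
-- ===== SOURCE A (Python) =====
-- ENTRY_STARTS_WITH = "<!--"
--
-- def line_counter(lines):
-- 	header_end_idx = -1
-- 	line_count_per_entry = 0
-- 	for x in range(len(lines)):
-- 		if lines[x].startswith(ENTRY_STARTS_WITH):
--
-- 			if header_end_idx == -1:
-- 				header_end_idx = x
-- 			else:
-- 				line_count_per_entry = x - header_end_idx
-- 				break
--
-- 	return header_end_idx, line_count_per_entry
-- ===== SOURCE B (Python) =====
-- ENTRY_STARTS_WITH = "<!--"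
--
-- def line_counter(lines):
--     def scan(ls, i):
--         # index (as offset i + position) of the first marker line in ls, or None
--         for l in ls:
--             if l.startswith(ENTRY_STARTS_WITH):
--                 return i
--             i += 1
--         return None
--
--     first = scan(lines, 0)
--     if first is None:
--         return -1, 0
--     second = scan(lines[first + 1:], first + 1)
--     return (first, 0) if second is None else (first, second - first)
-- ===== Notes on version B (the rewrite author's own statement) =====
-- stated objective: simpler
-- what changed: Replaces A's single stateful loop (sentinel -1 plus break) with two staged searches: a generic Option-returning first-marker scan is run once on the whole list and once on the suffix after the first hit, and the pair is assembled from the two results.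
import Mathlib
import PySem

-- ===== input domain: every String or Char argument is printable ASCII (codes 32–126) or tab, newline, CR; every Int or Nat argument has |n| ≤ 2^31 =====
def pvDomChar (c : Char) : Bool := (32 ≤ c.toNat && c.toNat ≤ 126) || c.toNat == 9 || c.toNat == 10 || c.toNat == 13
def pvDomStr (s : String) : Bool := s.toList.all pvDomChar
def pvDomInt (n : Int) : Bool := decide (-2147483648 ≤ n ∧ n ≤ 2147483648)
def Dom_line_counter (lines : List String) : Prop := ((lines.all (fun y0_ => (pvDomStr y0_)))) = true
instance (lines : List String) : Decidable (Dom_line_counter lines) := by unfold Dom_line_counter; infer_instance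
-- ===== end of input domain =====

-- B replaces A's single stateful early-exit loop by two staged searches with a generic
-- Option-returning first-marker scan, run on the whole list and then on the suffix (objective: simpler).

-- ===== PORT A =====
-- A's for-loop over range(len(lines)) with state (header_end_idx) and break, as structural recursion with the running index x.
def line_counter_loop : List String → Int → Int → Int × Int
  | [], h, _ => (h, 0)
  | l :: rest, h, x =>
    if PySem.Str.startswith l "<!--" then
      if h == -1 then line_counter_loop rest x (x + 1)
      else (h, x - h)
    else line_counter_loop rest h (x + 1)

def line_counter (lines : List String) : Int × Int :=
  line_counter_loop lines (-1) 0

-- ===== PORT B =====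
-- B's helper 'scan(ls, i)': first marker position in ls (offset by i), or None.
def pvScan : List String → Int → Option Int
  | [], _ => none
  | l :: rest, i =>
    if PySem.Str.startswith l "<!--" then some i else pvScan rest (i + 1)

def line_counter_alt (lines : List String) : Int × Int :=
  match pvScan lines 0 with
  | none => (-1, 0)
  | some first =>
    match pvScan (PySem.List.slice lines (some (first + 1)) none) (first + 1) with
    | none => (first, 0)
    | some second => (first, second - first)

-- ===== PRECONDITION & SPEC =====
def Spec_line_counter (lines : List String) (out : Int × Int) : Prop := out = line_counter_alt lines
instance (lines : List String) (out : Int × Int) : Decidable (Spec_line_counter lines out) := by unfold Spec_line_counter; infer_instance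

-- ===== CLAIM =====
def Claim_equal_line_counter : Prop := ∀ (lines : List String), Dom_line_counter lines → Spec_line_counter lines (line_counter lines)

-- ===== LEMMAS AND PROOFS =====
theorem pvScan_ge (lines : List String) (i f : Int) (h : pvScan lines i = some f) : i ≤ f := by
  induction lines generalizing i with
  | nil => simp [pvScan] at h
  | cons l rest ih =>
    simp only [pvScan] at h
    split_ifs at h with hs
    · cases h; omega
    · have := ih (i + 1) h; omega

theorem loop_found (lines : List String) (x h : Int) (hh : h ≠ -1) :
    line_counter_loop lines h x =
      (h, match pvScan lines x with | none => 0 | some b => b - h) := by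
  induction lines generalizing x with
  | nil => simp [line_counter_loop, pvScan]
  | cons l rest ih =>
    by_cases hs : PySem.Str.startswith l "<!--"
    · simp only [line_counter_loop, pvScan, hs, if_true, beq_iff_eq, hh, if_false]
    · simp only [line_counter_loop, pvScan, hs, Bool.false_eq_true, if_false, ih]

theorem loop_init (lines : List String) (x : Int) (hx : 0 ≤ x) :
    line_counter_loop lines (-1) x =
      (match pvScan lines x with
       | none => ((-1 : Int), (0 : Int))
       | some f =>
         match pvScan (lines.drop (f - x + 1).toNat) (f + 1) with
         | none => (f, 0)
         | some s => (f, s - f)) := by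
  induction lines generalizing x with
  | nil => simp [line_counter_loop, pvScan]
  | cons l rest ih =>
    by_cases hs : PySem.Str.startswith l "<!--"
    · have hx' : x ≠ -1 := by omega
      simp only [line_counter_loop, pvScan, hs, if_true, beq_iff_eq,
        loop_found rest (x + 1) x hx']
      cases hf : pvScan rest (x + 1) <;> simp [hf]
    · simp only [line_counter_loop, hs, Bool.false_eq_true, if_false]
      rw [ih (x + 1) (by omega)]
      have hps : pvScan (l :: rest) x = pvScan rest (x + 1) := by
        simp only [pvScan]; rw [if_neg hs]
      rw [hps]
      cases hf : pvScan rest (x + 1) with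
      | none => rfl
      | some f =>
        have hge := pvScan_ge rest (x + 1) f hf
        have h1 : (f - x + 1).toNat = (f - (x + 1) + 1).toNat + 1 := by omega
        simp [h1]

theorem slice_drop (lines : List String) (a : Int) (ha : 0 ≤ a) :
    PySem.List.slice lines (some a) none = lines.drop a.toNat := by
  have : a = ((a.toNat : Nat) : Int) := by omega
  rw [this, PySem.List.slice_from_natCast]
  simp
  omega

-- ===== VERDICT =====
theorem line_counter_spec : Claim_equal_line_counter := by
  intro lines _
  show line_counter lines = line_counter_alt lines
  rw [line_counter, loop_init lines 0 le_rfl, line_counter_alt]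
  cases hf : pvScan lines 0 with
  | none => rfl
  | some f =>
    have hge := pvScan_ge lines 0 f hf
    simp [slice_drop lines (f + 1) (by omega)]
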